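-- pv_equiv track=rewrite | github.com/MeerkatPerson/crypto-ctf | energy_saving/brauer_k.py | brauer_k
-- ===== SOURCE A (Python) =====
-- from typing import List
--
-- k: int = 6
--
-- two_pow_k: int = 2**k
--
-- def brauer_k(n: int) -> List[int]:
--
--     if n < two_pow_k:
--
--         return [i for i in range(1, two_pow_k)]
--
--     else:
--
--         q: int = n // two_pow_k
--
--         q_chain: List[int] = brauer_k(q)
--
--         two_pow_chain: List[int] = [q*pow(2, i) for i in range(1, k+1)]
--
--         return q_chain + two_pow_chain + [n]
-- ===== SOURCE B (Python) =====
-- def brauer_k(n):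
--     # iterative: collect the quotient sequence, then build the chain in one pass
--     qs = []
--     m = n
--     while m >= 64:
--         qs.append(m)
--         m //= 64
--     chain = list(range(1, 64))
--     for v in reversed(qs):
--         q = v // 64
--         chain.extend(q * 2**i for i in range(1, 7))
--         chain.append(v)
--     return chain
-- ===== Notes on version B (the rewrite author's own statement) =====
-- stated objective: alternative
-- what changed: Replaces A's recursion-with-list-concatenation by an iterative two-phase loop: first collect the sequence of successive base-2^k quotients into a list, then build the chain once with extend/append over that sequence reversed.
import Mathlib
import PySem

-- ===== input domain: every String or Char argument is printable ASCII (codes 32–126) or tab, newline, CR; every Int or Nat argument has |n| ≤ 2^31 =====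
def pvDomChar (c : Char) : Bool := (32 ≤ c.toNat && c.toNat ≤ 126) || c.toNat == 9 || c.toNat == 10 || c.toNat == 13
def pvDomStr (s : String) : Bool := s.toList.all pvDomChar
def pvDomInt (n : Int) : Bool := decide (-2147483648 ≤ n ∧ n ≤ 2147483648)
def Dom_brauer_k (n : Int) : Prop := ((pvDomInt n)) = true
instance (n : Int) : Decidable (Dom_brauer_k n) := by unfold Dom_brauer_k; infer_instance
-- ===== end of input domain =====

-- B replaces A's recursion-and-concatenation by an iterative two-phase build over the
-- quotient sequence (objective: alternative decomposition; same chain, same order).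

-- ===== PORT A =====
def brauer_k (n : Int) : List Int :=
  if _h : n < 64 then
    PySem.List.pyRange 1 64 1
  else
    let q : Int := PySem.Int.floordiv n 64
    let q_chain : List Int := brauer_k q
    let two_pow_chain : List Int := (PySem.List.pyRange 1 7 1).map (fun i => q * 2 ^ i.toNat)
    q_chain ++ two_pow_chain ++ [n]
termination_by n.toNat
decreasing_by
  rw [PySem.Int.floordiv_eq_ediv_of_pos (by omega : (0:Int) < 64)]
  omega

-- ===== PORT B =====
-- the while loop collecting qs = [m, m//64, ...] while m >= 64
def pvQs (m : Int) : List Int :=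
  if 64 ≤ m then m :: pvQs (PySem.Int.floordiv m 64) else []
termination_by m.toNat
decreasing_by
  rw [PySem.Int.floordiv_eq_ediv_of_pos (by omega : (0:Int) < 64)]
  omega

-- body of the for-loop over reversed qs: extend with q*2^i (i=1..6), append v
def pvStep (acc : List Int) (v : Int) : List Int :=
  let q : Int := PySem.Int.floordiv v 64
  acc ++ (PySem.List.pyRange 1 7 1).map (fun i => q * 2 ^ i.toNat) ++ [v]

def brauer_k_alt (n : Int) : List Int :=
  ((pvQs n).reverse).foldl pvStep (PySem.List.pyRange 1 64 1)

-- ===== PRECONDITION & SPEC =====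
def Spec_brauer_k (n : Int) (out : List Int) : Prop := out = brauer_k_alt n
instance (n : Int) (out : List Int) : Decidable (Spec_brauer_k n out) := by unfold Spec_brauer_k; infer_instance

-- ===== CLAIM (what is proved, stated in full; the proofs are below) =====
def Claim_equal_brauer_k : Prop := ∀ (n : Int), Dom_brauer_k n → Spec_brauer_k n (brauer_k n)

-- ===== LEMMAS AND PROOFS =====
theorem pvQs_lt (m : Int) (h : m < 64) : pvQs m = [] := by
  rw [pvQs]; simp [not_le.mpr h]

theorem pvQs_ge (m : Int) (h : ¬ m < 64) :
    pvQs m = m :: pvQs (PySem.Int.floordiv m 64) := by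
  rw [pvQs]; simp [not_lt.mp h]

theorem brauer_k_eq_alt (n : Int) : brauer_k n = brauer_k_alt n := by
  by_cases h : n < 64
  · rw [brauer_k]
    simp [h, brauer_k_alt, pvQs_lt n h]
  · have ih := brauer_k_eq_alt (PySem.Int.floordiv n 64)
    rw [brauer_k]
    simp only [h, dite_false]
    rw [ih]
    simp [brauer_k_alt, pvQs_ge n h, List.foldl_append, pvStep]
termination_by n.toNat
decreasing_by
  rw [PySem.Int.floordiv_eq_ediv_of_pos (by omega : (0:Int) < 64)]
  omega

-- ===== VERDICT (by name: the statement is the Claim_ definition above) =====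
theorem brauer_k_spec : Claim_equal_brauer_k := by
  intro n _ 
  exact brauer_k_eq_alt n
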